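-- pv_equiv track=rewrite | github.com/anonymous-55443259/CVE_Vul_File_Localization | Code/util/general.py | count_range
-- ===== SOURCE A (Python) =====
-- def count_range(data: list, interval: list):
--     res = {}
--     for i in range(len(interval)):
--         if i == 0:
--             res[f'1-{interval[0]}'] = 0
--         if i == len(interval) - 1:
--             res[f'>{interval[-1]}'] = 0
--             continue
--         else:
--             l = interval[i] + 1
--             r = interval[i + 1]
--             res[f'{l}-{r}'] = 0
--
--     for item in data:
--         for i, value in enumerate(interval):
--             if (i == 0 and item <= value) or (i == len(interval) - 1) or (item <= interval[i + 1]):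
--                 if i == 0 and item <= value:
--                     res[f'1-{value}'] += 1
--                 elif i == len(interval) - 1:
--                     res[f'>{value}'] += 1
--                 else:
--                     res[f'{value + 1}-{interval[i + 1]}'] += 1
--                 break
--     return res
-- ===== SOURCE B (Python) =====
-- def count_range(data: list, interval: list):
--     # Same counts, but each item is bucketed by binary search over a prefix-maximum
--     # array instead of a linear scan of interval: O((n+k) + n log k) vs A's O(n*k).
--     res = {}
--     n = len(interval)
--     if n == 0:
--         return res
--     low_key = f'1-{interval[0]}'
--     mid_keys = [f'{interval[i] + 1}-{interval[i + 1]}' for i in range(n - 1)]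
--     last_key = f'>{interval[-1]}'
--     res[low_key] = 0
--     for k in mid_keys:
--         res[k] = 0
--     res[last_key] = 0
--     # pmax[t] = max(interval[1 .. t+1]); nondecreasing, so bisection applies
--     # even when interval itself is unsorted, and the first t with pmax[t] >= item
--     # is also the first t with interval[t+1] >= item.
--     pmax = []
--     cur = None
--     for v in interval[1:]:
--         if cur is None or v > cur:
--             cur = v
--         pmax.append(cur)
--     m = len(pmax)
--     for item in data:
--         if item <= interval[0]:
--             key = low_key
--         else:
--             lo, hi = 0, m
--             while lo < hi:
--                 mid = (lo + hi) // 2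
--                 if pmax[mid] >= item:
--                     hi = mid
--                 else:
--                     lo = mid + 1
--             key = mid_keys[lo] if lo < m else last_key
--         res[key] += 1
--     return res
-- ===== Notes on version B (the rewrite author's own statement) =====
-- stated objective: faster
-- what changed: Replaces A's per-item linear scan of interval with a precomputed prefix-maximum array and a binary search per item (valid even for unsorted interval, since the first crossing of the prefix maximum is the first qualifying bucket), plus a single up-front pass building all bucket keys.
import Mathlib
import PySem

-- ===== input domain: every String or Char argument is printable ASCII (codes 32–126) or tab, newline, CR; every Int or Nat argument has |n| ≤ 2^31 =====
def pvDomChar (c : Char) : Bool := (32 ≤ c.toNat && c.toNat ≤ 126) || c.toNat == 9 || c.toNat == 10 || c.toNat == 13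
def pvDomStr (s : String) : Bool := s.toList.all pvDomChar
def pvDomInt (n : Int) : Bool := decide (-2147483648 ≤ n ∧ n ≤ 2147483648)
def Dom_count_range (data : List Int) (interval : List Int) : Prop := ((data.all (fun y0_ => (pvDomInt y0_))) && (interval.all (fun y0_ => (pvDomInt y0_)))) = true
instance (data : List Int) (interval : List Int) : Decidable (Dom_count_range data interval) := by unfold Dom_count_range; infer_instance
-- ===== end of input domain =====

-- B replaces A's per-item linear scan with a prefix-maximum array + binary search per item
-- (exact also on unsorted interval); measured faster on large inputs.

-- ===== PORT A =====
-- A's first loop: build the zeroed buckets dict (indices are always in range, so pyGetD's default is never used)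
def crInit (interval : List Int) : PySem.Dict String Int :=
  (PySem.List.pyRange 0 (interval.length : Int) 1).foldl (fun res i =>
    let res := if i = 0 then res.insert ("1-" ++ PySem.Int.toStr (PySem.List.pyGetD interval 0 0)) 0 else res
    if i = (interval.length : Int) - 1 then
      res.insert (">" ++ PySem.Int.toStr (PySem.List.pyGetD interval (-1) 0)) 0
    else
      let l := PySem.List.pyGetD interval i 0 + 1
      let r := PySem.List.pyGetD interval (i + 1) 0
      res.insert (PySem.Int.toStr l ++ "-" ++ PySem.Int.toStr r) 0) PySem.Dict.empty

-- A's inner 'for i, value in enumerate(interval): … break' loop, as index recursion from i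
-- (res[key] += 1 is modify with default 0; the key is always present, so the default is never used)
def crScan (interval : List Int) (item : Int) (res : PySem.Dict String Int) (i : Nat) :
    PySem.Dict String Int :=
  if _h : i < interval.length then
    let value := PySem.List.pyGetD interval (i : Int) 0
    if (i = 0 ∧ item ≤ value) ∨ i = interval.length - 1 ∨
        item ≤ PySem.List.pyGetD interval ((i : Int) + 1) 0 then
      if i = 0 ∧ item ≤ value then
        res.modify ("1-" ++ PySem.Int.toStr value) 0 (· + 1)
      else if i = interval.length - 1 then
        res.modify (">" ++ PySem.Int.toStr value) 0 (· + 1)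
      else
        res.modify (PySem.Int.toStr (value + 1) ++ "-" ++
          PySem.Int.toStr (PySem.List.pyGetD interval ((i : Int) + 1) 0)) 0 (· + 1)
    else crScan interval item res (i + 1)
  else res
termination_by interval.length - i

def count_range (data : List Int) (interval : List Int) : List (String × Int) :=
  (data.foldl (fun res item => crScan interval item res 0) (crInit interval)).items

-- ===== PORT B =====
-- Source B's prefix-maximum loop (cur starts as None)
def crbPmax : List Int → Option Int → List Int
  | [], _ => []
  | v :: rest, cur =>
    let c := match cur with
      | none => v
      | some c => if v > c then v else c
    c :: crbPmax rest (some c)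

-- Source B's hand-written while-loop binary search (lo, hi stay nonnegative in Python, so Nat)
def crbBsearch (pmax : List Int) (item : Int) (lo hi : Nat) : Nat :=
  if lo < hi then
    let mid := (lo + hi) / 2
    if pmax.getD mid 0 ≥ item then crbBsearch pmax item lo mid
    else crbBsearch pmax item (mid + 1) hi
  else lo
termination_by hi - lo
decreasing_by all_goals omega

def count_range_alt (data : List Int) (interval : List Int) : List (String × Int) :=
  let res : PySem.Dict String Int := PySem.Dict.empty
  let n := interval.length
  if n = 0 then res.items
  else
    let lowKey := "1-" ++ PySem.Int.toStr (PySem.List.pyGetD interval 0 0)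
    let midKeys := (PySem.List.pyRange 0 ((n : Int) - 1) 1).map (fun i =>
      PySem.Int.toStr (PySem.List.pyGetD interval i 0 + 1) ++ "-" ++
      PySem.Int.toStr (PySem.List.pyGetD interval (i + 1) 0))
    let lastKey := ">" ++ PySem.Int.toStr (PySem.List.pyGetD interval (-1) 0)
    let res := res.insert lowKey 0
    let res := midKeys.foldl (fun r k => r.insert k 0) res
    let res := res.insert lastKey 0
    let pmax := crbPmax (PySem.List.slice interval (some 1) none) none
    let m := pmax.length
    let res := data.foldl (fun r item =>
      let key :=
        if item ≤ PySem.List.pyGetD interval 0 0 then lowKey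
        else
          let lo := crbBsearch pmax item 0 m
          if lo < m then midKeys.getD lo "" else lastKey
      r.modify key 0 (· + 1)) res
    res.items

-- ===== PRECONDITION & SPEC =====
def Spec_count_range (data : List Int) (interval : List Int) (out : List (String × Int)) : Prop := out = count_range_alt data interval
instance (data : List Int) (interval : List Int) (out : List (String × Int)) : Decidable (Spec_count_range data interval out) := by unfold Spec_count_range; infer_instance

-- ===== CLAIM (what is proved, stated in full; the proofs are below) =====
def Claim_equal_count_range : Prop := ∀ (data : List Int) (interval : List Int), Dom_count_range data interval → Spec_count_range data interval (count_range data interval)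

-- ===== LEMMAS AND PROOFS =====


theorem crbPmax_length (l : List Int) (c : Option Int) : (crbPmax l c).length = l.length := by
  induction l generalizing c with
  | nil => rfl
  | cons v rest ih => simp [crbPmax, ih]

theorem crbPmax_ge_some (l : List Int) (y : Int) (t : Nat) (item : Int) (ht : t < l.length) :
    (item ≤ (crbPmax l (some y)).getD t 0) ↔ item ≤ y ∨ ∃ j ≤ t, item ≤ l.getD j 0 := by
  induction l generalizing y t with
  | nil => simp at ht
  | cons v rest ih =>
    have hshift : (∃ j ≤ t, item ≤ (v :: rest).getD j 0) ↔
        (item ≤ v ∨ ∃ j, j + 1 ≤ t ∧ item ≤ rest.getD j 0) := by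
      constructor
      · rintro ⟨j, hj, hle⟩
        match j with
        | 0 => left; simpa using hle
        | j + 1 => right; exact ⟨j, by omega, by simpa using hle⟩
      · rintro (h | ⟨j, hj, hle⟩)
        · exact ⟨0, by omega, by simpa using h⟩
        · exact ⟨j + 1, by omega, by simpa using hle⟩
    rw [hshift]
    match t with
    | 0 =>
      simp only [crbPmax, List.getD_cons_zero]
      split_ifs with hv
      · constructor
        · intro h; right; left; omega
        · rintro (h | h | ⟨j, hj, hle⟩) <;> omega
      · constructor
        · intro h; left; omega
        · rintro (h | h | ⟨j, hj, hle⟩) <;> omega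
    | t + 1 =>
      have hrest : t < rest.length := by simpa using Nat.lt_of_succ_lt_succ ht
      simp only [crbPmax, List.getD_cons_succ]
      rw [ih _ t hrest]
      split_ifs with hv
      · constructor
        · rintro (h | ⟨j, hj, hle⟩)
          exacts [Or.inr (Or.inl h), Or.inr (Or.inr ⟨j, by omega, hle⟩)]
        · rintro (h | h | ⟨j, hj, hle⟩)
          exacts [Or.inl (by omega), Or.inl h, Or.inr ⟨j, by omega, hle⟩]
      · constructor
        · rintro (h | ⟨j, hj, hle⟩)
          exacts [Or.inl h, Or.inr (Or.inr ⟨j, by omega, hle⟩)]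
        · rintro (h | h | ⟨j, hj, hle⟩)
          exacts [Or.inl h, Or.inl (by omega), Or.inr ⟨j, by omega, hle⟩]

theorem crbPmax_ge (l : List Int) (t : Nat) (item : Int) (ht : t < l.length) :
    (item ≤ (crbPmax l none).getD t 0) ↔ ∃ j ≤ t, item ≤ l.getD j 0 := by
  match l with
  | [] => simp at ht
  | v :: rest =>
    match t with
    | 0 => simp [crbPmax]
    | t + 1 =>
      have hrest : t < rest.length := by simpa using Nat.lt_of_succ_lt_succ ht
      simp only [crbPmax, List.getD_cons_succ]
      rw [crbPmax_ge_some rest v t item hrest]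
      constructor
      · rintro (h | ⟨j, hj, hle⟩)
        · exact ⟨0, by omega, by simpa using h⟩
        · exact ⟨j + 1, by omega, by simpa using hle⟩
      · rintro ⟨j, hj, hle⟩
        match j with
        | 0 => left; simpa using hle
        | j + 1 => right; exact ⟨j, by omega, by simpa using hle⟩

theorem crbPmax_mono (l : List Int) (s t : Nat) (hst : s ≤ t) (ht : t < l.length) :
    (crbPmax l none).getD s 0 ≤ (crbPmax l none).getD t 0 := by
  have hs : s < l.length := lt_of_le_of_lt hst ht
  have h1 := (crbPmax_ge l s ((crbPmax l none).getD s 0) hs).mp le_rfl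
  have h2 := (crbPmax_ge l t ((crbPmax l none).getD s 0) ht).mpr
  obtain ⟨j, hj, h⟩ := h1
  exact h2 ⟨j, le_trans hj hst, h⟩

theorem crbBsearch_spec (pm : List Int) (item : Int) (lo hi : Nat)
    (hhi : hi ≤ pm.length) (hlohi : lo ≤ hi)
    (hmono : ∀ s t, s ≤ t → t < pm.length → pm.getD s 0 ≤ pm.getD t 0) :
    lo ≤ crbBsearch pm item lo hi ∧ crbBsearch pm item lo hi ≤ hi ∧
      (∀ j, lo ≤ j → j < crbBsearch pm item lo hi → pm.getD j 0 < item) ∧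
      (crbBsearch pm item lo hi < hi → item ≤ pm.getD (crbBsearch pm item lo hi) 0) := by
  fun_induction crbBsearch pm item lo hi with
  | case1 lo hi h mid hge ih =>
    obtain ⟨h1, h2, h3, h4⟩ := ih (by omega) (by omega)
    refine ⟨h1, by omega, h3, fun _ => ?_⟩
    rcases eq_or_lt_of_le h2 with heq | hlt
    · rw [heq]; exact hge
    · exact h4 hlt
  | case2 lo hi h mid hge ih =>
    have hmidlen : mid < pm.length := by omega
    obtain ⟨h1, h2, h3, h4⟩ := ih hhi (by omega)
    refine ⟨by omega, h2, fun j hj1 hj2 => ?_, h4⟩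
    rcases Nat.lt_or_ge j (mid + 1) with hj | hj
    · exact lt_of_le_of_lt (hmono j mid (by omega) hmidlen) (by omega)
    · exact h3 j hj hj2
  | case3 lo hi h =>
    exact ⟨le_rfl, hlohi, fun j h1 h2 => absurd h2 (by omega), fun hlt => absurd hlt h⟩

theorem crScan_low (interval : List Int) (item : Int) (res : PySem.Dict String Int)
    (hne : interval ≠ []) (hle : item ≤ PySem.List.pyGetD interval 0 0) :
    crScan interval item res 0 =
      res.modify ("1-" ++ PySem.Int.toStr (PySem.List.pyGetD interval 0 0)) 0 (· + 1) := by
  have hn : 0 < interval.length := List.length_pos_iff.mpr hne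
  rw [crScan]
  simp [hn, hle]

theorem crScan_mid (interval : List Int) (item : Int) (F : Nat)
    (hne : interval ≠ [])
    (hgt : ¬ item ≤ PySem.List.pyGetD interval 0 0)
    (hF1 : F ≤ interval.length - 1)
    (hF2 : ∀ t, t < F → ¬ item ≤ interval.getD (t + 1) 0)
    (hF3 : F < interval.length - 1 → item ≤ interval.getD (F + 1) 0)
    (i : Nat) (res : PySem.Dict String Int) (hi : i ≤ F) :
    crScan interval item res i =
      res.modify (if F < interval.length - 1
        then PySem.Int.toStr (interval.getD F 0 + 1) ++ "-" ++
          PySem.Int.toStr (interval.getD (F + 1) 0)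
        else ">" ++ PySem.Int.toStr (interval.getD (interval.length - 1) 0)) 0 (· + 1) := by
  have hn : 0 < interval.length := List.length_pos_iff.mpr hne
  have hgt' : ¬ item ≤ interval.getD 0 0 := by
    rwa [PySem.List.pyGetD_zero] at hgt
  have hilen : i < interval.length := by omega
  have hcast : ((i : Int) + 1) = ((i + 1 : Nat) : Int) := by push_cast; ring
  rw [crScan]
  rw [dif_pos hilen]
  simp only [hcast, PySem.List.pyGetD_natCast]
  by_cases hiF : i = F
  · subst hiF
    have hnot0 : ¬ (i = 0 ∧ item ≤ interval.getD i 0) := by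
      rintro ⟨rfl, h⟩; exact hgt' h
    by_cases hFlt : i < interval.length - 1
    · rw [if_pos (Or.inr (Or.inr (hF3 hFlt)))]
      rw [if_neg hnot0, if_neg (by omega), if_pos hFlt]
    · have hF : i = interval.length - 1 := by omega
      rw [if_pos (Or.inr (Or.inl hF))]
      rw [if_neg hnot0, if_pos hF, if_neg hFlt, hF]
  · have hlt : i < F := by omega
    rw [if_neg, crScan_mid interval item F hne hgt hF1 hF2 hF3 (i + 1) res (by omega)]
    rintro (⟨rfl, h⟩ | h | h)
    · exact hgt' h
    · omega
    · exact hF2 i hlt h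
termination_by F - i

theorem crStep_eq (interval : List Int) (hne : interval ≠ []) (item : Int)
    (res : PySem.Dict String Int) :
    crScan interval item res 0 =
      res.modify
        (if item ≤ PySem.List.pyGetD interval 0 0 then
          "1-" ++ PySem.Int.toStr (PySem.List.pyGetD interval 0 0)
        else
          if crbBsearch (crbPmax (PySem.List.slice interval (some 1) none) none) item 0
              (crbPmax (PySem.List.slice interval (some 1) none) none).length <
              (crbPmax (PySem.List.slice interval (some 1) none) none).length then
            ((PySem.List.pyRange 0 ((interval.length : Int) - 1) 1).map (fun i =>
                PySem.Int.toStr (PySem.List.pyGetD interval i 0 + 1) ++ "-" ++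
                PySem.Int.toStr (PySem.List.pyGetD interval (i + 1) 0))).getD
              (crbBsearch (crbPmax (PySem.List.slice interval (some 1) none) none) item 0
                (crbPmax (PySem.List.slice interval (some 1) none) none).length) ""
          else ">" ++ PySem.Int.toStr (PySem.List.pyGetD interval (-1) 0)) 0 (· + 1) := by
  have hn : 0 < interval.length := List.length_pos_iff.mpr hne
  by_cases hle : item ≤ PySem.List.pyGetD interval 0 0
  · rw [if_pos hle]
    exact crScan_low interval item res hne hle
  · rw [if_neg hle]
    rw [PySem.List.slice_from_one]
    set tl := interval.tail with htl
    set pm := crbPmax tl none with hpm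
    have hpmlen : pm.length = interval.length - 1 := by
      rw [hpm, crbPmax_length, htl, List.length_tail]
    have htlget : ∀ t, tl.getD t 0 = interval.getD (t + 1) 0 := by
      obtain ⟨a, rest, rfl⟩ := List.exists_cons_of_ne_nil hne
      intro t; simp [htl]
    set r := crbBsearch pm item 0 pm.length with hr
    obtain ⟨_, hr2, hr3, hr4⟩ := crbBsearch_spec pm item 0 pm.length le_rfl (by omega)
      (fun s t hst ht => crbPmax_mono tl s t hst (by rwa [hpm, crbPmax_length] at ht))
    have hF2 : ∀ t, t < r → ¬ item ≤ interval.getD (t + 1) 0 := by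
      intro t htr hcontra
      have htlen : t < tl.length := by
        have := hr2; rw [hpm, crbPmax_length] at *; omega
      have : item ≤ pm.getD t 0 :=
        (crbPmax_ge tl t item htlen).mpr ⟨t, le_rfl, (htlget t) ▸ hcontra⟩
      exact absurd this (not_le.mpr (hr3 t (Nat.zero_le t) htr))
    have hF3 : r < interval.length - 1 → item ≤ interval.getD (r + 1) 0 := by
      intro hrlt
      have hrlen : r < tl.length := by rw [htl, List.length_tail]; omega
      have := hr4 (by omega)
      obtain ⟨j, hj, hle'⟩ := (crbPmax_ge tl r item hrlen).mp this
      rcases Nat.lt_or_ge j r with hjr | hjr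
      · exact absurd ((crbPmax_ge tl j item (by omega)).mpr ⟨j, le_rfl, hle'⟩)
          (not_le.mpr (hr3 j (Nat.zero_le j) hjr))
      · have hjr' : j = r := by omega
        rw [← htlget r, ← hjr']; exact hle'
    rw [crScan_mid interval item r hne hle (by omega) hF2 hF3 0 res (Nat.zero_le r)]
    rw [hpmlen]
    by_cases hrm : r < interval.length - 1
    · rw [if_pos hrm, if_pos hrm]
      congr 1
      have hcast : ((interval.length : Int) - 1) = ((interval.length - 1 : Nat) : Int) := by
        push_cast [hn]; omega
      rw [hcast]
      have hmid : ((PySem.List.pyRange 0 ((interval.length - 1 : Nat) : Int) 1).map (fun i =>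
          PySem.Int.toStr (PySem.List.pyGetD interval i 0 + 1) ++ "-" ++
          PySem.Int.toStr (PySem.List.pyGetD interval (i + 1) 0))).getD r "" =
          PySem.Int.toStr (PySem.List.pyGetD interval (r : Int) 0 + 1) ++ "-" ++
          PySem.Int.toStr (PySem.List.pyGetD interval ((r : Int) + 1) 0) := by
        rw [List.getD_eq_getElem?_getD,
          PySem.List.getElem?_map_pyRange_zero _ (interval.length - 1) r hrm,
          Option.getD_some]
      rw [hmid]
      have hcast2 : ((r : Int) + 1) = ((r + 1 : Nat) : Int) := by push_cast; ring
      simp only [hcast2, PySem.List.pyGetD_natCast, List.getD_eq_getElem?_getD]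
    · rw [if_neg hrm, if_neg hrm]
      congr 2
      rw [PySem.List.pyGetD_neg_one interval 0 hne]
      rw [List.getLast_eq_getElem, List.getD_eq_getElem _ _ (by omega)]

theorem crInit_eq (interval : List Int) (hne : interval ≠ []) :
    crInit interval =
      (((PySem.List.pyRange 0 ((interval.length : Int) - 1) 1).map (fun i =>
          PySem.Int.toStr (PySem.List.pyGetD interval i 0 + 1) ++ "-" ++
          PySem.Int.toStr (PySem.List.pyGetD interval (i + 1) 0))).foldl
        (fun r k => r.insert k 0)
        (PySem.Dict.empty.insert
          ("1-" ++ PySem.Int.toStr (PySem.List.pyGetD interval 0 0)) 0)).insert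
        (">" ++ PySem.Int.toStr (PySem.List.pyGetD interval (-1) 0)) 0 := by
  have hn : 0 < interval.length := List.length_pos_iff.mpr hne
  unfold crInit
  rw [PySem.List.pyRange_one_append 0 ((interval.length : Int) - 1) (interval.length : Int)
    (by omega) (by omega)]
  have hlast : PySem.List.pyRange ((interval.length : Int) - 1) (interval.length : Int) 1 =
      [(interval.length : Int) - 1] := by
    rw [PySem.List.pyRange_one_cons (by omega)]
    simp [PySem.List.pyRange]
  rw [hlast, List.foldl_append, List.foldl_map]
  by_cases hn1 : interval.length = 1
  · have h0 : ((interval.length : Int) - 1) = 0 := by rw [hn1]; ring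
    rw [h0]
    simp only [PySem.List.pyRange, List.foldl_cons, List.foldl_nil]
    norm_num
  · have h2 : (0 : Int) < (interval.length : Int) - 1 := by
      have : 2 ≤ interval.length := by omega
      omega
    rw [PySem.List.pyRange_one_cons h2]
    have hz : ((0 : Int) = (interval.length : Int) - 1) = False := by
      simp only [eq_iff_iff, iff_false]; omega
    have hz' : (((interval.length : Int) - 1) = 0) = False := by
      simp only [eq_iff_iff, iff_false]; omega
    simp only [List.foldl_cons, List.foldl_nil, hz, hz', if_true, if_false]
    congr 1
    refine PySem.List.foldl_congr_mem _ _ _ _ ?_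
    intro acc x hx
    obtain ⟨hx1, hx2⟩ := PySem.List.mem_pyRange_one.mp hx
    rw [if_neg (by omega), if_neg (by omega)]

theorem count_range_eq (data interval : List Int) :
    count_range data interval = count_range_alt data interval := by
  by_cases hne : interval = []
  · subst hne
    have hscan : ∀ (item : Int) (res : PySem.Dict String Int),
        crScan [] item res 0 = res := by
      intro item res; rw [crScan]; simp
    have hfold : ∀ (d : List Int) (res : PySem.Dict String Int),
        d.foldl (fun res item => crScan [] item res 0) res = res := by
      intro d
      induction d with
      | nil => intro res; rfl
      | cons a t ih => intro res; rw [List.foldl_cons, hscan]; exact ih res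
    simp [count_range, count_range_alt, crInit, PySem.List.pyRange, hfold]
  · have hn : ¬ interval.length = 0 := by simpa using hne
    simp only [count_range, count_range_alt, if_neg hn]
    rw [crInit_eq interval hne]
    congr 1
    refine PySem.List.foldl_congr_mem _ _ _ _ ?_
    intro acc x _
    exact crStep_eq interval hne x acc

-- ===== VERDICT (by name: the statement is the Claim_ definition above) =====
theorem count_range_spec : Claim_equal_count_range := by
  intro data interval _
  exact count_range_eq data interval
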